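-- pv_equiv track=rewrite | github.com/sseira/2Pac-Resurrected | rhymingSauce.py | findRhymingPart
-- ===== SOURCE A (Python) =====
-- def findRhymingPart(line):
-- 	words = line.split(" ")
-- 	stressIndex = None
--
-- 	# find primary stress
-- 	for index, word in reversed(list(enumerate(words))):
-- 		if word.find('1') != -1:
-- 			stressIndex = index
-- 			break
-- 	# find secondary stress if no primary found
-- 	if stressIndex is None:
-- 		for index, word in reversed(list(enumerate(words))):
-- 			if word.find('2') != -1:
-- 				stressIndex = index
-- 				break
--
-- 	# find no stress if no secondary found
-- 	if stressIndex is None: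
-- 		for index, word in reversed(list(enumerate(words))):
-- 			if word.find('0') != -1:
-- 				stressIndex = index
-- 				break
--
-- 	return words[stressIndex:]
-- ===== SOURCE B (Python) =====
-- def findRhymingPart(line):
--     words = line.split(" ")
--     pos1 = pos2 = pos0 = None
--     for index, word in enumerate(words):
--         if '1' in word:
--             pos1 = index
--         if '2' in word:
--             pos2 = index
--         if '0' in word:
--             pos0 = index
--     stressIndex = pos1 if pos1 is not None else (pos2 if pos2 is not None else pos0)
--     return words[stressIndex:]
-- ===== Notes on version B (the rewrite author's own statement) =====
-- stated objective: alternative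
-- what changed: Replaces A's three reversed scans (each building reversed(list(enumerate(words)))) with one forward pass that maintains the last-seen index for each of the markers '1','2','0', then picks by priority.
import Mathlib
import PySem

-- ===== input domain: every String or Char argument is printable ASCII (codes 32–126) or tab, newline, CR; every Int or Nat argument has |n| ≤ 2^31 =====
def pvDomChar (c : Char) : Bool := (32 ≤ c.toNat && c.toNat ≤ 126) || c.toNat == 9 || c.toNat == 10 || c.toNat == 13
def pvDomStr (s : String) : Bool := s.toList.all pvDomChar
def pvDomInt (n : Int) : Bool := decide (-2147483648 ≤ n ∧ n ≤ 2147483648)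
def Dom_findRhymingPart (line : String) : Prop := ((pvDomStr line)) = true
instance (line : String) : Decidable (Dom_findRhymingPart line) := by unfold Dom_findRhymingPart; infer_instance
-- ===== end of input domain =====

-- B replaces A's three reversed scans with one forward pass keeping the last-seen index per marker; objective: alternative (same cost class).

-- ===== PORT A =====
-- A's three 'for … in reversed(list(enumerate(words))): if word.find(t) != -1: break' loops,
-- one helper parametrised by the marker t (A's loops are identical except for the marker).
def revScan (t : String) : List (Int × String) → Option Int
  | [] => none
  | (i, w) :: rest => if PySem.Str.find w t ≠ -1 then some i else revScan t rest

def findRhymingPart (line : String) : List String :=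
  let words := (PySem.Str.split? line " ").getD []   -- sep " " is nonempty, so split? is always some
  let ps := (PySem.List.enumerate words 0).reverse
  let stressIndex : Option Int :=
    match revScan "1" ps with
    | some i => some i
    | none =>
      match revScan "2" ps with
      | some i => some i
      | none => revScan "0" ps
  match stressIndex with
  | none => words                                    -- words[None:] is the whole list
  | some i => PySem.List.slice words (some i) none

-- ===== PORT B =====
-- one forward fold over enumerate(words), state = (pos1, pos2, pos0) last-seen indices
def scanStep (acc : Option Int × Option Int × Option Int) (iw : Int × String) :
    Option Int × Option Int × Option Int :=
  ( if PySem.Str.isIn "1" iw.2 then some iw.1 else acc.1,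
    if PySem.Str.isIn "2" iw.2 then some iw.1 else acc.2.1,
    if PySem.Str.isIn "0" iw.2 then some iw.1 else acc.2.2 )

def findRhymingPart_alt (line : String) : List String :=
  let words := (PySem.Str.split? line " ").getD []   -- sep " " is nonempty, so split? is always some
  let p := (PySem.List.enumerate words 0).foldl scanStep (none, none, none)
  let stressIndex : Option Int :=
    match p.1 with
    | some i => some i
    | none =>
      match p.2.1 with
      | some i => some i
      | none => p.2.2
  match stressIndex with
  | none => words                                    -- words[None:] is the whole list
  | some i => PySem.List.slice words (some i) none

-- ===== PRECONDITION & SPEC =====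
def Spec_findRhymingPart (line : String) (out : List String) : Prop := out = findRhymingPart_alt line
instance (line : String) (out : List String) : Decidable (Spec_findRhymingPart line out) := by unfold Spec_findRhymingPart; infer_instance

-- ===== CLAIM (what is proved, stated in full; the proofs are below) =====
def Claim_equal_findRhymingPart : Prop := ∀ (line : String), Dom_findRhymingPart line → Spec_findRhymingPart line (findRhymingPart line)

-- ===== LEMMAS AND PROOFS =====

-- the two marker tests agree: word.find(t) != -1 ↔ t in word
theorem pred_bridge (t w : String) :
    (decide (PySem.Str.find w t ≠ -1)) = PySem.Str.isIn t w := by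
  rcases h : PySem.Str.isIn t w with _ | _
  · simp only [PySem.Str.isIn_eq] at h
    rw [decide_eq_false_iff_not]
    simp only [ne_eq, not_not, PySem.Str.find_eq, PySem.Chars.find_eq_neg_one_iff]
    exact (PySem.Chars.isIn_eq_false_iff _ _).mp h
  · simp only [PySem.Str.isIn_eq] at h
    rw [decide_eq_true_iff]
    simp only [PySem.Str.find_eq, PySem.Chars.find_ne_neg_one_iff]
    exact (PySem.Chars.isIn_iff_infix _ _).mp h

-- A's break-loop is find? on its list
theorem revScan_eq_find? (t : String) (l : List (Int × String)) :
    revScan t l =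
      (l.find? (fun iw => PySem.Str.isIn t iw.2)).elim none (fun iw => some iw.1) := by
  induction l with
  | nil => rfl
  | cons hd tl ih =>
    obtain ⟨i, w⟩ := hd
    rw [revScan, List.find?_cons]
    rcases h : PySem.Str.isIn t w with _ | _
    · have hfind : ¬ (PySem.Str.find w t ≠ -1) := by
        have hb := pred_bridge t w
        rw [h, decide_eq_false_iff_not] at hb
        exact hb
      simp only [if_neg hfind, ih, h]
    · have hfind : PySem.Str.find w t ≠ -1 := by
        have hb := pred_bridge t w
        rw [h, decide_eq_true_iff] at hb
        exact hb
      simp only [if_pos hfind, Option.elim]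

-- B's last-seen fold is find? on the reversed list
theorem foldl_last (p : String → Bool) (l : List (Int × String)) (init : Option Int) :
    l.foldl (fun acc iw => if p iw.2 then some iw.1 else acc) init =
      (l.reverse.find? (fun iw => p iw.2)).elim init (fun iw => some iw.1) := by
  induction l generalizing init with
  | nil => rfl
  | cons hd tl ih =>
    obtain ⟨i, w⟩ := hd
    rw [List.foldl_cons, ih, List.reverse_cons, List.find?_append]
    rcases h : tl.reverse.find? (fun iw => p iw.2) with _ | ⟨j, v⟩
    · rw [h]
      rcases hp : p w with _ | _ <;> simp [List.find?, hp]
    · simp [h]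

-- the triple fold is three independent folds
theorem foldl_scanStep (l : List (Int × String)) (a b c : Option Int) :
    l.foldl scanStep (a, b, c) =
      ( l.foldl (fun acc iw => if PySem.Str.isIn "1" iw.2 then some iw.1 else acc) a,
        l.foldl (fun acc iw => if PySem.Str.isIn "2" iw.2 then some iw.1 else acc) b,
        l.foldl (fun acc iw => if PySem.Str.isIn "0" iw.2 then some iw.1 else acc) c ) := by
  induction l generalizing a b c with
  | nil => rfl
  | cons hd tl ih =>
    obtain ⟨i, w⟩ := hd
    rw [List.foldl_cons, scanStep, ih]
    rfl

theorem component_eq (t : String) (ws : List String) :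
    (PySem.List.enumerate ws 0).foldl
        (fun acc iw => if PySem.Str.isIn t iw.2 then some iw.1 else acc) none
      = revScan t (PySem.List.enumerate ws 0).reverse := by
  rw [foldl_last, revScan_eq_find?]

-- ===== VERDICT (by name: the statement is the Claim_ definition above) =====
theorem findRhymingPart_spec : Claim_equal_findRhymingPart := by
  intro line _
  unfold Spec_findRhymingPart findRhymingPart findRhymingPart_alt
  simp only [foldl_scanStep, component_eq]
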